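-- pv_equiv track=rewrite | github.com/brafter12345-cmyk/PSQ | security_scanner/pdf_report.py | _finding_colour
-- ===== SOURCE A (Python) =====
-- def _finding_colour(text: str) -> str:
--     """Return hex colour based on finding severity keywords."""
--     tl = text.lower()
--     if "critical" in tl:
--         return "#dc2626"
--     if any(kw in tl for kw in ("high-risk", "missing", "not enforced", "not enabled",
--                                 "no spf", "no dmarc", "no dkim", "exposed", "no waf")):
--         return "#f97316"
--     if any(kw in tl for kw in ("medium-risk", "no modern tls", "hsts", "listed")):
--         return "#eab308"
--     return "#64748b"
-- ===== SOURCE B (Python) =====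
-- _KW_RANK = [
--     ("critical", 0),
--     ("high-risk", 1), ("missing", 1), ("not enforced", 1), ("not enabled", 1),
--     ("no spf", 1), ("no dmarc", 1), ("no dkim", 1), ("exposed", 1), ("no waf", 1),
--     ("medium-risk", 2), ("no modern tls", 2), ("hsts", 2), ("listed", 2),
-- ]
-- _COLOURS = ["#dc2626", "#f97316", "#eab308", "#64748b"]
--
-- def _finding_colour(text: str) -> str:
--     """Return hex colour based on finding severity keywords.
--
--     Single text-driven scan: walk every position of the lowercased text,
--     record the best (minimum) severity rank of any keyword starting there,
--     then map the rank to its colour."""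
--     tl = text.lower()
--     best = 3
--     for i in range(len(tl)):
--         for kw, rank in _KW_RANK:
--             if rank < best and tl.startswith(kw, i):
--                 best = rank
--     return _COLOURS[best]
-- ===== Notes on version B (the rewrite author's own statement) =====
-- stated objective: alternative
-- what changed: Replaced the priority-ordered chain of substring-membership tests with a single text-driven scan: walk each position of the lowercased text, check which keywords start there, aggregate the minimum severity rank, and index a colour array with it.
import Mathlib
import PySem

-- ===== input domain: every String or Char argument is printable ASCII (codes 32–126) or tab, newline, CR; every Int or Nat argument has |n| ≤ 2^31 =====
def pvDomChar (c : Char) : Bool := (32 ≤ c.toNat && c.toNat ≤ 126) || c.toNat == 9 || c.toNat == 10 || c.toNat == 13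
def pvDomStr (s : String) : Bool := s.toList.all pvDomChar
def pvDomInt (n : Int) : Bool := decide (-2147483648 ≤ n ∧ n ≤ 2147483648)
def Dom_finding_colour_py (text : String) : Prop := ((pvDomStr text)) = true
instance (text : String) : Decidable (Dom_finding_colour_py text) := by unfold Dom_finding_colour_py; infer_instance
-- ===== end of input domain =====

-- B replaces A's priority chain of substring tests with one text-driven scan that
-- aggregates the minimum severity rank of any keyword starting at each position
-- (objective: alternative).

-- ===== PORT A =====
def finding_colour_py (text : String) : String :=
  let tl := PySem.Str.lower text
  if PySem.Str.isIn "critical" tl then "#dc2626"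
  else if ["high-risk", "missing", "not enforced", "not enabled",
           "no spf", "no dmarc", "no dkim", "exposed", "no waf"].any
            (fun kw => PySem.Str.isIn kw tl) then "#f97316"
  else if ["medium-risk", "no modern tls", "hsts", "listed"].any
            (fun kw => PySem.Str.isIn kw tl) then "#eab308"
  else "#64748b"

-- ===== PORT B =====
def pvKwRank : List (String × Nat) :=
  [("critical", 0),
   ("high-risk", 1), ("missing", 1), ("not enforced", 1), ("not enabled", 1),
   ("no spf", 1), ("no dmarc", 1), ("no dkim", 1), ("exposed", 1), ("no waf", 1),
   ("medium-risk", 2), ("no modern tls", 2), ("hsts", 2), ("listed", 2)]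

def pvColours : List String := ["#dc2626", "#f97316", "#eab308", "#64748b"]

-- inner loop of Source B: "for kw, rank in _KW_RANK: if rank < best and tl.startswith(kw, i): best = rank";
-- Python's tl.startswith(kw, i) (0 ≤ i ≤ len(tl)) is exactly Chars.startswith on (toList tl).drop i.
def pvScanKw (t : List Char) (L : List (String × Nat)) (best : Nat) : Nat :=
  match L with
  | [] => best
  | (kw, r) :: rest =>
      pvScanKw t rest
        (if r < best ∧ PySem.Chars.startswith t kw.toList = true then r else best)

-- outer loop of Source B: "for i in range(len(tl))" (range of a nonnegative length = List.range)
def pvScanPos (s : List Char) (idxs : List Nat) (best : Nat) : Nat :=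
  match idxs with
  | [] => best
  | i :: rest => pvScanPos s rest (pvScanKw (s.drop i) pvKwRank best)

def finding_colour_py_alt (text : String) : String :=
  let tl := PySem.Str.lower text
  pvColours.getD (pvScanPos tl.toList (List.range tl.toList.length) 3) ""

-- ===== PRECONDITION & SPEC =====
def Spec_finding_colour_py (text : String) (out : String) : Prop := out = finding_colour_py_alt text
instance (text : String) (out : String) : Decidable (Spec_finding_colour_py text out) := by unfold Spec_finding_colour_py; infer_instance

-- ===== CLAIM (what is proved, stated in full; the proofs are below) =====
def Claim_equal_finding_colour_py : Prop := ∀ (text : String), Dom_finding_colour_py text → Spec_finding_colour_py text (finding_colour_py text)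

-- ===== LEMMAS AND PROOFS =====

theorem pvScanKw_le (t : List Char) (L : List (String × Nat)) (b : Nat) :
    pvScanKw t L b ≤ b := by
  induction L generalizing b with
  | nil => simp [pvScanKw]
  | cons kr rest ih =>
      obtain ⟨kw, r⟩ := kr
      simp only [pvScanKw]
      refine le_trans (ih _) ?_
      split_ifs with h
      · exact le_of_lt h.1
      · exact le_rfl

theorem pvScanKw_mem (t : List Char) (L : List (String × Nat)) (b : Nat) :
    pvScanKw t L b = b ∨
      ∃ kr ∈ L, PySem.Chars.startswith t kr.1.toList = true ∧ pvScanKw t L b = kr.2 := by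
  induction L generalizing b with
  | nil => left; simp [pvScanKw]
  | cons kr rest ih =>
      obtain ⟨kw, r⟩ := kr
      simp only [pvScanKw]
      split_ifs with h
      · rcases ih r with h1 | ⟨kr', hmem, hsw, heq⟩
        · right; exact ⟨(kw, r), by simp, h.2, h1⟩
        · right; exact ⟨kr', by simp [hmem], hsw, heq⟩
      · rcases ih b with h1 | ⟨kr', hmem, hsw, heq⟩
        · left; exact h1
        · right; exact ⟨kr', by simp [hmem], hsw, heq⟩

theorem pvScanKw_ub (t : List Char) (L : List (String × Nat)) (b : Nat)
    (kr : String × Nat) (hmem : kr ∈ L)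
    (hsw : PySem.Chars.startswith t kr.1.toList = true) :
    pvScanKw t L b ≤ kr.2 := by
  induction L generalizing b with
  | nil => cases hmem
  | cons hd rest ih =>
      obtain ⟨kw, r⟩ := hd
      simp only [pvScanKw]
      rcases List.mem_cons.mp hmem with heq | htail
      · subst heq
        split_ifs with h
        · exact pvScanKw_le _ _ _
        · refine le_trans (pvScanKw_le _ _ _) ?_
          simp only [hsw, and_true] at h
          omega
      · exact ih _ htail

theorem pvScanPos_le (s : List Char) (idxs : List Nat) (b : Nat) :
    pvScanPos s idxs b ≤ b := by
  induction idxs generalizing b with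
  | nil => simp [pvScanPos]
  | cons i rest ih =>
      simp only [pvScanPos]
      exact le_trans (ih _) (pvScanKw_le _ _ _)

theorem pvScanPos_mem (s : List Char) (idxs : List Nat) (b : Nat) :
    pvScanPos s idxs b = b ∨
      ∃ i ∈ idxs, ∃ kr ∈ pvKwRank,
        PySem.Chars.startswith (s.drop i) kr.1.toList = true ∧ pvScanPos s idxs b = kr.2 := by
  induction idxs generalizing b with
  | nil => left; simp [pvScanPos]
  | cons i rest ih =>
      simp only [pvScanPos]
      rcases ih (pvScanKw (s.drop i) pvKwRank b) with h1 | ⟨i', hi', kr, hmem, hsw, heq⟩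
      · rcases pvScanKw_mem (s.drop i) pvKwRank b with h2 | ⟨kr, hmem, hsw, heq⟩
        · left; rw [h1, h2]
        · right; exact ⟨i, by simp, kr, hmem, hsw, by rw [h1, heq]⟩
      · right; exact ⟨i', by simp [hi'], kr, hmem, hsw, heq⟩

theorem pvScanPos_ub (s : List Char) (idxs : List Nat) (b : Nat)
    (i : Nat) (hi : i ∈ idxs) (kr : String × Nat) (hmem : kr ∈ pvKwRank)
    (hsw : PySem.Chars.startswith (s.drop i) kr.1.toList = true) :
    pvScanPos s idxs b ≤ kr.2 := by
  induction idxs generalizing b with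
  | nil => cases hi
  | cons j rest ih =>
      simp only [pvScanPos]
      rcases List.mem_cons.mp hi with heq | htail
      · subst heq
        exact le_trans (pvScanPos_le _ _ _) (pvScanKw_ub _ _ _ kr hmem hsw)
      · exact ih _ htail

-- "sub in tl" (A's membership test) ⟺ some position of range(len) where sub starts (B's scan)
theorem pvMatchedIff (s : List Char) (sub : String) (hne : sub.toList ≠ []) :
    (∃ i ∈ List.range s.length, PySem.Chars.startswith (s.drop i) sub.toList = true) ↔
      PySem.Chars.isIn sub.toList s = true := by
  rw [← PySem.Chars.exists_prefix_drop_iff_isIn]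
  constructor
  · rintro ⟨i, _, hsw⟩
    exact ⟨i, (PySem.Chars.startswith_iff _ _).mp hsw⟩
  · rintro ⟨j, hpre⟩
    refine ⟨j, ?_, (PySem.Chars.startswith_iff _ _).mpr hpre⟩
    rw [List.mem_range]
    by_contra hj
    push Not at hj
    rw [List.drop_eq_nil_of_le hj] at hpre
    exact hne (List.prefix_nil.mp hpre)

-- the keyword of any entry of pvKwRank is nonempty
theorem pvKwRank_ne (kr : String × Nat) (hmem : kr ∈ pvKwRank) : kr.1.toList ≠ [] := by
  simp only [pvKwRank, List.mem_cons, List.not_mem_nil, or_false] at hmem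
  rcases hmem with h | h | h | h | h | h | h | h | h | h | h | h | h | h <;> subst h <;> decide

-- main body-level equivalence, for an arbitrary (already lowercased) string tl
theorem pvMain (tl : String) :
    (if PySem.Str.isIn "critical" tl then "#dc2626"
     else if ["high-risk", "missing", "not enforced", "not enabled",
              "no spf", "no dmarc", "no dkim", "exposed", "no waf"].any
               (fun kw => PySem.Str.isIn kw tl) then "#f97316"
     else if ["medium-risk", "no modern tls", "hsts", "listed"].any
               (fun kw => PySem.Str.isIn kw tl) then "#eab308"
     else "#64748b")
    = pvColours.getD (pvScanPos tl.toList (List.range tl.toList.length) 3) "" := by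
  obtain ⟨s, hs⟩ : ∃ s, s = tl.toList := ⟨_, rfl⟩
  rw [← hs]
  obtain ⟨r, hr⟩ : ∃ r, r = pvScanPos s (List.range s.length) 3 := ⟨_, rfl⟩
  rw [← hr]
  have hbridge : ∀ kw : String, kw.toList ≠ [] →
      (PySem.Str.isIn kw tl = true ↔
        ∃ i ∈ List.range s.length, PySem.Chars.startswith (s.drop i) kw.toList = true) := by
    intro kw hne
    rw [PySem.Str.isIn_eq, hs, pvMatchedIff tl.toList kw hne, ← hs]
  have hmem_match : ∀ kr ∈ pvKwRank, ∀ i ∈ List.range s.length,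
      PySem.Chars.startswith (s.drop i) kr.1.toList = true →
      PySem.Str.isIn kr.1 tl = true := by
    intro kr hmem i hi hsw
    exact (hbridge kr.1 (pvKwRank_ne kr hmem)).mpr ⟨i, hi, hsw⟩
  by_cases h1 : PySem.Str.isIn "critical" tl = true
  · obtain ⟨i, hi, hsw⟩ := (hbridge "critical" (by decide)).mp h1
    have hub : r ≤ 0 := hr ▸ pvScanPos_ub s _ 3 i hi ("critical", 0) (by simp [pvKwRank]) hsw
    rw [if_pos h1, Nat.le_zero.mp hub]
    rfl
  · rw [if_neg h1]
    by_cases h2 : (["high-risk", "missing", "not enforced", "not enabled",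
        "no spf", "no dmarc", "no dkim", "exposed", "no waf"].any
          (fun kw => PySem.Str.isIn kw tl)) = true
    · have hub : r ≤ 1 := by
        simp only [List.any_eq_true, List.mem_cons, List.not_mem_nil, or_false] at h2
        obtain ⟨kw, hkwmem, hin⟩ := h2
        rcases hkwmem with h | h | h | h | h | h | h | h | h <;> subst h <;>
          · obtain ⟨i, hi, hsw⟩ := (hbridge _ (by decide)).mp hin
            exact hr ▸ pvScanPos_ub s _ 3 i hi (_, 1) (by simp [pvKwRank]) hsw
      have hne0 : r ≠ 0 := by
        intro h0
        rcases pvScanPos_mem s (List.range s.length) 3 with hcase | ⟨i, hi, kr, hmem, hsw, heq⟩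
        · omega
        · have hmatch := hmem_match kr hmem i hi hsw
          rw [hr, heq] at h0
          simp only [pvKwRank, List.mem_cons, List.not_mem_nil, or_false] at hmem
          rcases hmem with h | h | h | h | h | h | h | h | h | h | h | h | h | h
          · subst h; exact h1 hmatch
          · subst h; exact absurd h0 (by decide)
          · subst h; exact absurd h0 (by decide)
          · subst h; exact absurd h0 (by decide)
          · subst h; exact absurd h0 (by decide)
          · subst h; exact absurd h0 (by decide)
          · subst h; exact absurd h0 (by decide)
          · subst h; exact absurd h0 (by decide)
          · subst h; exact absurd h0 (by decide)
          · subst h; exact absurd h0 (by decide)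
          · subst h; exact absurd h0 (by decide)
          · subst h; exact absurd h0 (by decide)
          · subst h; exact absurd h0 (by decide)
          · subst h; exact absurd h0 (by decide)
      have hr1 : r = 1 := by omega
      rw [if_pos h2, hr1]
      rfl
    · rw [if_neg h2]
      by_cases h3 : (["medium-risk", "no modern tls", "hsts", "listed"].any
          (fun kw => PySem.Str.isIn kw tl)) = true
      · have hub : r ≤ 2 := by
          simp only [List.any_eq_true, List.mem_cons, List.not_mem_nil, or_false] at h3
          obtain ⟨kw, hkwmem, hin⟩ := h3
          rcases hkwmem with h | h | h | h <;> subst h <;>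
            · obtain ⟨i, hi, hsw⟩ := (hbridge _ (by decide)).mp hin
              exact hr ▸ pvScanPos_ub s _ 3 i hi (_, 2) (by simp [pvKwRank]) hsw
        have hlow : r ≠ 0 ∧ r ≠ 1 := by
          constructor <;> intro h0 <;>
          · rcases pvScanPos_mem s (List.range s.length) 3 with hcase | ⟨i, hi, kr, hmem, hsw, heq⟩
            · omega
            · have hmatch := hmem_match kr hmem i hi hsw
              rw [hr, heq] at h0
              simp only [pvKwRank, List.mem_cons, List.not_mem_nil, or_false] at hmem
              rcases hmem with h | h | h | h | h | h | h | h | h | h | h | h | h | h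
              · subst h; exact h1 hmatch
              · subst h; first | exact absurd h0 (by decide) | exact h2 (by simp only [List.any_cons, List.any_nil, Bool.or_eq_true, Bool.or_false]; exact Or.inl hmatch)
              · subst h; first | exact absurd h0 (by decide) | exact h2 (by simp only [List.any_cons, List.any_nil, Bool.or_eq_true, Bool.or_false]; exact Or.inr (Or.inl hmatch))
              · subst h; first | exact absurd h0 (by decide) | exact h2 (by simp only [List.any_cons, List.any_nil, Bool.or_eq_true, Bool.or_false]; exact Or.inr (Or.inr (Or.inl hmatch)))
              · subst h; first | exact absurd h0 (by decide) | exact h2 (by simp only [List.any_cons, List.any_nil, Bool.or_eq_true, Bool.or_false]; exact Or.inr (Or.inr (Or.inr (Or.inl hmatch))))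
              · subst h; first | exact absurd h0 (by decide) | exact h2 (by simp only [List.any_cons, List.any_nil, Bool.or_eq_true, Bool.or_false]; exact Or.inr (Or.inr (Or.inr (Or.inr (Or.inl hmatch)))))
              · subst h; first | exact absurd h0 (by decide) | exact h2 (by simp only [List.any_cons, List.any_nil, Bool.or_eq_true, Bool.or_false]; exact Or.inr (Or.inr (Or.inr (Or.inr (Or.inr (Or.inl hmatch))))))
              · subst h; first | exact absurd h0 (by decide) | exact h2 (by simp only [List.any_cons, List.any_nil, Bool.or_eq_true, Bool.or_false]; exact Or.inr (Or.inr (Or.inr (Or.inr (Or.inr (Or.inr (Or.inl hmatch)))))))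
              · subst h; first | exact absurd h0 (by decide) | exact h2 (by simp only [List.any_cons, List.any_nil, Bool.or_eq_true, Bool.or_false]; exact Or.inr (Or.inr (Or.inr (Or.inr (Or.inr (Or.inr (Or.inr (Or.inl hmatch))))))))
              · subst h; first | exact absurd h0 (by decide) | exact h2 (by simp only [List.any_cons, List.any_nil, Bool.or_eq_true, Bool.or_false]; exact Or.inr (Or.inr (Or.inr (Or.inr (Or.inr (Or.inr (Or.inr (Or.inr (hmatch)))))))))
              · subst h; exact absurd h0 (by decide)
              · subst h; exact absurd h0 (by decide)
              · subst h; exact absurd h0 (by decide)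
              · subst h; exact absurd h0 (by decide)
        have hr2 : r = 2 := by omega
        rw [if_pos h3, hr2]
        rfl
      · have hr3 : r = 3 := by
          rcases pvScanPos_mem s (List.range s.length) 3 with hcase | ⟨i, hi, kr, hmem, hsw, heq⟩
          · rw [hr]; exact hcase
          · exfalso
            have hmatch := hmem_match kr hmem i hi hsw
            simp only [pvKwRank, List.mem_cons, List.not_mem_nil, or_false] at hmem
            rcases hmem with h | h | h | h | h | h | h | h | h | h | h | h | h | h
            · subst h; exact h1 hmatch
            · subst h; exact h2 (by simp only [List.any_cons, List.any_nil, Bool.or_eq_true, Bool.or_false]; exact Or.inl hmatch)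
            · subst h; exact h2 (by simp only [List.any_cons, List.any_nil, Bool.or_eq_true, Bool.or_false]; exact Or.inr (Or.inl hmatch))
            · subst h; exact h2 (by simp only [List.any_cons, List.any_nil, Bool.or_eq_true, Bool.or_false]; exact Or.inr (Or.inr (Or.inl hmatch)))
            · subst h; exact h2 (by simp only [List.any_cons, List.any_nil, Bool.or_eq_true, Bool.or_false]; exact Or.inr (Or.inr (Or.inr (Or.inl hmatch))))
            · subst h; exact h2 (by simp only [List.any_cons, List.any_nil, Bool.or_eq_true, Bool.or_false]; exact Or.inr (Or.inr (Or.inr (Or.inr (Or.inl hmatch)))))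
            · subst h; exact h2 (by simp only [List.any_cons, List.any_nil, Bool.or_eq_true, Bool.or_false]; exact Or.inr (Or.inr (Or.inr (Or.inr (Or.inr (Or.inl hmatch))))))
            · subst h; exact h2 (by simp only [List.any_cons, List.any_nil, Bool.or_eq_true, Bool.or_false]; exact Or.inr (Or.inr (Or.inr (Or.inr (Or.inr (Or.inr (Or.inl hmatch)))))))
            · subst h; exact h2 (by simp only [List.any_cons, List.any_nil, Bool.or_eq_true, Bool.or_false]; exact Or.inr (Or.inr (Or.inr (Or.inr (Or.inr (Or.inr (Or.inr (Or.inl hmatch))))))))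
            · subst h; exact h2 (by simp only [List.any_cons, List.any_nil, Bool.or_eq_true, Bool.or_false]; exact Or.inr (Or.inr (Or.inr (Or.inr (Or.inr (Or.inr (Or.inr (Or.inr (hmatch)))))))))
            · subst h; exact h3 (by simp only [List.any_cons, List.any_nil, Bool.or_eq_true, Bool.or_false]; exact Or.inl hmatch)
            · subst h; exact h3 (by simp only [List.any_cons, List.any_nil, Bool.or_eq_true, Bool.or_false]; exact Or.inr (Or.inl hmatch))
            · subst h; exact h3 (by simp only [List.any_cons, List.any_nil, Bool.or_eq_true, Bool.or_false]; exact Or.inr (Or.inr (Or.inl hmatch)))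
            · subst h; exact h3 (by simp only [List.any_cons, List.any_nil, Bool.or_eq_true, Bool.or_false]; exact Or.inr (Or.inr (Or.inr (hmatch))))
        rw [if_neg h3, hr3]
        rfl

-- ===== VERDICT (by name: the statement is the Claim_ definition above) =====
theorem finding_colour_py_spec : Claim_equal_finding_colour_py := by
  intro text _
  unfold Spec_finding_colour_py finding_colour_py finding_colour_py_alt
  exact pvMain (PySem.Str.lower text)
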